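-- pv_equiv track=rewrite | github.com/Brainana/GLASS-PRIMES | alignment_utils.py | parse_alignment_from_sequences
-- ===== SOURCE A (Python) =====
-- def parse_alignment_from_sequences(seqxA, seqM, seqyA):
--     """
--     Parse alignment from sequence strings (seqxA, seqM, seqyA).
--
--     Args:
--         seqxA: Model sequence with gaps
--         seqM: Alignment annotation string
--         seqyA: Reference sequence with gaps
--
--     Returns:
--         List of (model_idx, ref_idx) tuples for aligned residues
--     """
--     alignment = []
--     idx1 = idx2 = 0
--     for a1, a2, ann in zip(seqxA, seqyA, seqM):
--         if a1 != '-' and a2 != '-':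
--             if ann in [':', '.']:
--                 alignment.append((idx1, idx2))
--             idx1 += 1
--             idx2 += 1
--         elif a1 == '-' and a2 != '-':
--             idx2 += 1
--         elif a1 != '-' and a2 == '-':
--             idx1 += 1
--     return alignment
-- ===== SOURCE B (Python) =====
-- def parse_alignment_from_sequences(seqxA, seqM, seqyA):
--     def prefix_counts(s):
--         acc, out = 0, []
--         for c in s:
--             out.append(acc)
--             acc += c != '-'
--         return out
--     px = prefix_counts(seqxA)
--     py = prefix_counts(seqyA)
--     return [(p, q)
--             for a1, a2, ann, p, q in zip(seqxA, seqyA, seqM, px, py)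
--             if a1 != '-' and a2 != '-' and (ann == ':' or ann == '.')]
-- ===== Notes on version B (the rewrite author's own statement) =====
-- stated objective: alternative
-- what changed: Replaces A's single loop that threads two mutable residue counters through the branches with a precomputed exclusive prefix-count table for each sequence followed by a separate filtering comprehension over the zipped columns.
import Mathlib
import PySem

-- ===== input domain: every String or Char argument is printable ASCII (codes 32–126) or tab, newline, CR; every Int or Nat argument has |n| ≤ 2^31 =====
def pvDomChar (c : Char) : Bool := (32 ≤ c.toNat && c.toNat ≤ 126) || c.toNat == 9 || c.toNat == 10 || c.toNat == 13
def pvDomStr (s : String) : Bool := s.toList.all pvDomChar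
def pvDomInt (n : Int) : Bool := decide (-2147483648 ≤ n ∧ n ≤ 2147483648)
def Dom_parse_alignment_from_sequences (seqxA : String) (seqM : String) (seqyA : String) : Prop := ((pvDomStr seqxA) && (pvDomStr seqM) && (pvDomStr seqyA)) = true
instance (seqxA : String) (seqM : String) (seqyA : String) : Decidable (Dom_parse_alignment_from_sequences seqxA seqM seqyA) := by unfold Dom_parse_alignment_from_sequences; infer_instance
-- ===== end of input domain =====

-- ===== PORT A =====
-- B replaces A's counter-threading loop with prefix-count tables plus a filter pass (alternative decomposition, same cost).
def pvLoopA : List (Char × Char × Char) → Int → Int → List (Int × Int) → List (Int × Int)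
  | [], _, _, acc => acc
  | (a1, a2, ann) :: rest, i1, i2, acc =>
    if a1 ≠ '-' ∧ a2 ≠ '-' then
      pvLoopA rest (i1 + 1) (i2 + 1)
        (acc ++ (if ann = ':' ∨ ann = '.' then [(i1, i2)] else []))
    else if a1 = '-' ∧ a2 ≠ '-' then pvLoopA rest i1 (i2 + 1) acc
    else if a1 ≠ '-' ∧ a2 = '-' then pvLoopA rest (i1 + 1) i2 acc
    else pvLoopA rest i1 i2 acc

def parse_alignment_from_sequences (seqxA : String) (seqM : String) (seqyA : String) : List (Int × Int) :=
  pvLoopA (seqxA.toList.zip (seqyA.toList.zip seqM.toList)) 0 0 []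

-- ===== PORT B =====
-- exclusive running count of non-gap characters (Source B's prefix_counts, acc threaded as parameter)
def pvPrefixGo (acc : Int) : List Char → List Int
  | [] => []
  | c :: cs => acc :: pvPrefixGo (acc + (if c ≠ '-' then 1 else 0)) cs

def parse_alignment_from_sequences_alt (seqxA : String) (seqM : String) (seqyA : String) : List (Int × Int) :=
  let px := pvPrefixGo 0 seqxA.toList
  let py := pvPrefixGo 0 seqyA.toList
  (seqxA.toList.zip (seqyA.toList.zip (seqM.toList.zip (px.zip py)))).filterMap
    (fun t => if t.1 ≠ '-' ∧ t.2.1 ≠ '-' ∧ (t.2.2.1 = ':' ∨ t.2.2.1 = '.')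
      then some t.2.2.2 else none)

-- ===== PRECONDITION & SPEC =====
def Spec_parse_alignment_from_sequences (seqxA : String) (seqM : String) (seqyA : String) (out : List (Int × Int)) : Prop := out = parse_alignment_from_sequences_alt seqxA seqM seqyA
instance (seqxA : String) (seqM : String) (seqyA : String) (out : List (Int × Int)) : Decidable (Spec_parse_alignment_from_sequences seqxA seqM seqyA out) := by unfold Spec_parse_alignment_from_sequences; infer_instance

-- ===== CLAIM (what is proved, stated in full; the proofs are below) =====
def Claim_equal_parse_alignment_from_sequences : Prop := ∀ (seqxA : String) (seqM : String) (seqyA : String), Dom_parse_alignment_from_sequences seqxA seqM seqyA → Spec_parse_alignment_from_sequences seqxA seqM seqyA (parse_alignment_from_sequences seqxA seqM seqyA)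

-- ===== LEMMAS AND PROOFS =====
lemma pvKey : ∀ (xs ys ms : List Char) (i1 i2 : Int) (acc : List (Int × Int)),
    pvLoopA (xs.zip (ys.zip ms)) i1 i2 acc
      = acc ++ (xs.zip (ys.zip (ms.zip ((pvPrefixGo i1 xs).zip (pvPrefixGo i2 ys))))).filterMap
          (fun t => if t.1 ≠ '-' ∧ t.2.1 ≠ '-' ∧ (t.2.2.1 = ':' ∨ t.2.2.1 = '.')
            then some t.2.2.2 else none)
  | [], ys, ms, i1, i2, acc => by simp [pvLoopA]
  | x :: xs, [], ms, i1, i2, acc => by simp [pvLoopA]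
  | x :: xs, y :: ys, [], i1, i2, acc => by simp [pvLoopA]
  | x :: xs, y :: ys, m :: ms, i1, i2, acc => by
    by_cases hx : x = '-' <;> by_cases hy : y = '-' <;>
      simp [pvLoopA, pvPrefixGo, hx, hy, pvKey xs ys ms, List.append_assoc] <;>
      by_cases hm : m = ':' ∨ m = '.' <;> simp [hm, hx, hy]

-- ===== VERDICT (by name: the statement is the Claim_ definition above) =====
theorem parse_alignment_from_sequences_spec : Claim_equal_parse_alignment_from_sequences := by
  intro x m y _
  show _ = _
  simpa [parse_alignment_from_sequences, parse_alignment_from_sequences_alt]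
    using pvKey x.toList y.toList m.toList 0 0 []
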